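-- pv_equiv track=rewrite | github.com/sem2vec/sem2vec-SE | nx_graphs/prepare_data.py | build_func_basename_fid_map
-- ===== SOURCE A (Python) =====
-- def build_func_basename_fid_map(graphs):
--     ret = dict()
--     for fid in graphs:
--         addr, bn, fn = fid
--         if bn not in ret:
--             ret[bn] = []
--         ret[bn].append(fid)
--     return ret
-- ===== SOURCE B (Python) =====
-- def build_func_basename_fid_map(graphs):
--     # Two-pass: collect distinct basenames in first-occurrence order, then
--     # build each group with one filter pass per basename.
--     basenames = dict.fromkeys(fid[1] for fid in graphs)
--     return {bn: [fid for fid in graphs if fid[1] == bn] for bn in basenames}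
-- ===== Notes on version B (the rewrite author's own statement) =====
-- stated objective: alternative
-- what changed: A builds the groups in one pass, appending each fid into a dict entry; B first deduplicates the basenames (dict.fromkeys) and then builds each group by a separate filter pass over the whole list in a dict comprehension.
import Mathlib
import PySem

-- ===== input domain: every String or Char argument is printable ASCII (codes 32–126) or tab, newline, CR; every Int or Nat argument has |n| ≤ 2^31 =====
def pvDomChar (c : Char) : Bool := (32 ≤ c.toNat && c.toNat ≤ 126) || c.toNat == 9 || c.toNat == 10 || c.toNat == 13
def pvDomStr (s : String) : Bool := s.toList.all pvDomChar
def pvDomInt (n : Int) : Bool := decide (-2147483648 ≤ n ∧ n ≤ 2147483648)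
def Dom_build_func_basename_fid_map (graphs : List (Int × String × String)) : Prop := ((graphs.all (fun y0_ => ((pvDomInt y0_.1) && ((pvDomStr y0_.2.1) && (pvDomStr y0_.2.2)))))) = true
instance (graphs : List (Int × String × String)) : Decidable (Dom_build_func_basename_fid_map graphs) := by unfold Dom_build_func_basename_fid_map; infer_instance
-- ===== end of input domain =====

-- B replaces A's single dict-appending pass by dedup-of-basenames + one filter pass per basename (alternative decomposition, not faster).


-- ===== PORT A =====
def build_func_basename_fid_map (graphs : List (Int × String × String)) : List (String × List (Int × String × String)) :=
  (graphs.foldl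
    (fun ret fid =>
      let bn := fid.2.1
      let ret := if ret.contains bn then ret else ret.insert bn ([] : List (Int × String × String))
      ret.modify bn [] (fun l => l ++ [fid]))
    PySem.Dict.empty).items

-- ===== PORT B =====
def build_func_basename_fid_map_alt (graphs : List (Int × String × String)) : List (String × List (Int × String × String)) :=
  (PySem.List.dedup (graphs.map (fun fid => fid.2.1))).map
    (fun bn => (bn, graphs.filter (fun fid => fid.2.1 == bn)))

-- ===== PRECONDITION & SPEC =====
def Spec_build_func_basename_fid_map (graphs : List (Int × String × String)) (out : List (String × List (Int × String × String))) : Prop := out = build_func_basename_fid_map_alt graphs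
instance (graphs : List (Int × String × String)) (out : List (String × List (Int × String × String))) : Decidable (Spec_build_func_basename_fid_map graphs out) := by unfold Spec_build_func_basename_fid_map; infer_instance

-- ===== CLAIM (what is proved, stated in full; the proofs are below) =====
def Claim_equal_build_func_basename_fid_map : Prop := ∀ (graphs : List (Int × String × String)), Dom_build_func_basename_fid_map graphs → Spec_build_func_basename_fid_map graphs (build_func_basename_fid_map graphs)

-- ===== LEMMAS AND PROOFS =====

-- A's "ensure the key exists, then append" step equals a single modify-with-default step.
lemma pv_step_eq (d : PySem.Dict String (List (Int × String × String))) (f : Int × String × String) :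
    (if d.contains f.2.1 then d else d.insert f.2.1 []).modify f.2.1 [] (fun l => l ++ [f])
      = d.modify f.2.1 [] (fun l => l ++ [f]) := by
  by_cases h : d.contains f.2.1 = true
  · simp [h]
  · simp only [Bool.not_eq_true] at h
    have h' := h
    simp only [PySem.Dict.contains] at h'
    have hf : List.find? (fun p => p.1 == f.2.1) d.items = none := by
      rw [List.find?_eq_none]
      intro p hp
      have := List.any_eq_false.mp h' p hp
      simpa using this
    simp [h', PySem.Dict.modify, PySem.Dict.insert, PySem.Dict.contains, PySem.Dict.getD,
      PySem.Dict.get?, List.any_append, List.find?_append, hf]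
    conv_rhs => rw [← List.map_id d.items]
    refine List.map_congr_left (fun p hp => ?_)
    have := List.any_eq_false.mp h' p hp
    simp only [beq_iff_eq] at this
    simp [this]

lemma pv_fold_eq (gs : List (Int × String × String)) (d : PySem.Dict String (List (Int × String × String))) :
    gs.foldl
      (fun ret fid =>
        let bn := fid.2.1
        let ret := if ret.contains bn then ret else ret.insert bn ([] : List (Int × String × String))
        ret.modify bn [] (fun l => l ++ [fid])) d
      = gs.foldl (fun d f => d.modify f.2.1 [] (fun l => l ++ [f])) d := by
  induction gs generalizing d with
  | nil => rfl
  | cons f gs ih =>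
      simp only [List.foldl_cons]
      rw [pv_step_eq, ih]

theorem build_func_basename_fid_map_main (graphs : List (Int × String × String)) :
    build_func_basename_fid_map graphs = build_func_basename_fid_map_alt graphs := by
  unfold build_func_basename_fid_map build_func_basename_fid_map_alt
  rw [pv_fold_eq]
  set M := graphs.foldl (fun d f => d.modify f.2.1 [] (fun l => l ++ [f])) PySem.Dict.empty with hM
  have hkeys : M.keys = PySem.Set.ofList (graphs.map (fun f => f.2.1)) := by
    rw [hM, PySem.Dict.keys_foldl_modify_key graphs (fun f => f.2.1) [] (fun _ f l => l ++ [f])]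
    simp [PySem.Set.update_nil_left]
  have hnodup : M.keys.Nodup := by
    rw [hM]
    exact PySem.Dict.nodup_keys_foldl_modify_key graphs (fun f => f.2.1) [] (fun _ f l => l ++ [f])
      PySem.Dict.empty (by simp)
  have hgetD : ∀ c, M.getD c [] = graphs.filter (fun f => f.2.1 == c) := by
    intro c
    have h1 : M = (graphs.map (fun f => (f.2.1, f))).foldl
        (fun d p => d.modify p.1 [] (fun l => l ++ [p.2])) PySem.Dict.empty := by
      rw [hM, List.foldl_map]
    rw [h1, PySem.Dict.getD_foldl_modify_append]
    simp [List.filter_map, Function.comp_def]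
  rw [PySem.Dict.items_eq_map_keys M hnodup [], hkeys, ← PySem.List.dedup_eq_ofList]
  exact List.map_congr_left (fun k _ => by rw [hgetD k])

-- ===== VERDICT (by name: the statement is the Claim_ definition above) =====
theorem build_func_basename_fid_map_spec : Claim_equal_build_func_basename_fid_map := by
  intro graphs _
  unfold Spec_build_func_basename_fid_map
  exact build_func_basename_fid_map_main graphs
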